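-- pv_equiv track=rewrite | github.com/dankton96/SubSyncComparator | SubSyncComparator.py | IsSubTimeLine
-- ===== SOURCE A (Python) =====
-- nums=['0','1','2','3','4','5','6','7','8','9']
--
-- numsPos=[0,1,3,4,6,7,9,10,11,17,18,20,21,23,24,26,27,28]
--
-- ColonsPos=[2,5,19,22]
--
-- CommasPos=[8,25]
--
-- def IsSubTimeLine(strP):
--         if len(strP)!=30:
--             return False
--         else:
--             numst=[]
--             for p in numsPos:
--                 if strP[p] not in nums:
--                     return False
--             for n in ColonsPos:
--                 if strP[n]!=':':
--                     return False
--             for n1 in CommasPos: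
--                 if strP[n1]!=',':
--                     return False
--             if strP[13:16]!='-->':
--                 return False
--         return True
-- ===== SOURCE B (Python) =====
-- nums=['0','1','2','3','4','5','6','7','8','9']
--
-- # 30-char spec: 'd' = digit, '*' = any char (positions A never checks), else literal.
-- PATTERN = "dd:dd:dd,ddd*-->*dd:dd:dd,ddd*"
--
-- def IsSubTimeLine(strP):
--     if len(strP) != 30:
--         return False
--     for i, pc in enumerate(PATTERN):
--         if pc == 'd':
--             if strP[i] not in nums:
--                 return False
--         elif pc == '*':
--             continue
--         elif strP[i] != pc:
--             return False
--     return True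
-- ===== Notes on version B (the rewrite author's own statement) =====
-- stated objective: simpler
-- what changed: Replaced A's four separate position-list scans plus a slice comparison with one table-driven pass over a 30-character pattern string (digit/wildcard/literal per position).
import Mathlib
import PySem

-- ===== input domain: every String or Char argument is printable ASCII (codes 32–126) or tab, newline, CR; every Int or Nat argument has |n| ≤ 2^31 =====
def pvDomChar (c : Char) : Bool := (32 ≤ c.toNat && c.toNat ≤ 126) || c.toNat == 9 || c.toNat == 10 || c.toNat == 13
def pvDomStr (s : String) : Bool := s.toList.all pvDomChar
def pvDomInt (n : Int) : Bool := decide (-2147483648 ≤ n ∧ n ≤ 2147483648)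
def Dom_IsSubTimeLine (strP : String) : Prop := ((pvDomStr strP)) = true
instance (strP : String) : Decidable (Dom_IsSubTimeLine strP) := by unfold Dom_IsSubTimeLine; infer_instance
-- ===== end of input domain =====

-- B replaces A's four position-list scans plus a slice comparison by one table-driven
-- pass over a 30-character pattern ('d' digit, '*' any, else literal); objective: simpler.

-- ===== PORT A =====
def pyNums : List Char := ['0','1','2','3','4','5','6','7','8','9']
def pyNumsPos : List Int := [0,1,3,4,6,7,9,10,11,17,18,20,21,23,24,26,27,28]
def pyColonsPos : List Int := [2,5,19,22]
def pyCommasPos : List Int := [8,25]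

def IsSubTimeLine (strP : String) : Bool :=
  let l := strP.toList
  if l.length != 30 then false
  else if !(pyNumsPos.all fun p => pyNums.contains (PySem.List.pyGetD l p ' ')) then false
  else if !(pyColonsPos.all fun n => PySem.List.pyGetD l n ' ' == ':') then false
  else if !(pyCommasPos.all fun n1 => PySem.List.pyGetD l n1 ' ' == ',') then false
  else if PySem.List.slice l (some 13) (some 16) != ['-', '-', '>'] then false
  else true

-- ===== PORT B =====
def pyPattern : List Char := "dd:dd:dd,ddd*-->*dd:dd:dd,ddd*".toList

def IsSubTimeLine_alt (strP : String) : Bool :=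
  if strP.toList.length != 30 then false
  else (pyPattern.zip strP.toList).all fun pc =>
    if pc.1 == 'd' then pyNums.contains pc.2
    else if pc.1 == '*' then true
    else pc.2 == pc.1

-- ===== PRECONDITION & SPEC =====
def Spec_IsSubTimeLine (strP : String) (out : Bool) : Prop := out = IsSubTimeLine_alt strP
instance (strP : String) (out : Bool) : Decidable (Spec_IsSubTimeLine strP out) := by unfold Spec_IsSubTimeLine; infer_instance

-- ===== CLAIM (what is proved, stated in full; the proofs are below) =====
def Claim_equal_IsSubTimeLine : Prop := ∀ (strP : String), Dom_IsSubTimeLine strP → Spec_IsSubTimeLine strP (IsSubTimeLine strP)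

-- ===== LEMMAS AND PROOFS =====
theorem IsSubTimeLine_eq_alt (strP : String) : IsSubTimeLine strP = IsSubTimeLine_alt strP := by
  unfold IsSubTimeLine IsSubTimeLine_alt
  generalize strP.toList = l
  rcases l with _|⟨c0, l⟩; · rfl
  rcases l with _|⟨c1, l⟩; · rfl
  rcases l with _|⟨c2, l⟩; · rfl
  rcases l with _|⟨c3, l⟩; · rfl
  rcases l with _|⟨c4, l⟩; · rfl
  rcases l with _|⟨c5, l⟩; · rfl
  rcases l with _|⟨c6, l⟩; · rfl
  rcases l with _|⟨c7, l⟩; · rfl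
  rcases l with _|⟨c8, l⟩; · rfl
  rcases l with _|⟨c9, l⟩; · rfl
  rcases l with _|⟨c10, l⟩; · rfl
  rcases l with _|⟨c11, l⟩; · rfl
  rcases l with _|⟨c12, l⟩; · rfl
  rcases l with _|⟨c13, l⟩; · rfl
  rcases l with _|⟨c14, l⟩; · rfl
  rcases l with _|⟨c15, l⟩; · rfl
  rcases l with _|⟨c16, l⟩; · rfl
  rcases l with _|⟨c17, l⟩; · rfl
  rcases l with _|⟨c18, l⟩; · rfl
  rcases l with _|⟨c19, l⟩; · rfl
  rcases l with _|⟨c20, l⟩; · rfl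
  rcases l with _|⟨c21, l⟩; · rfl
  rcases l with _|⟨c22, l⟩; · rfl
  rcases l with _|⟨c23, l⟩; · rfl
  rcases l with _|⟨c24, l⟩; · rfl
  rcases l with _|⟨c25, l⟩; · rfl
  rcases l with _|⟨c26, l⟩; · rfl
  rcases l with _|⟨c27, l⟩; · rfl
  rcases l with _|⟨c28, l⟩; · rfl
  rcases l with _|⟨c29, l⟩; · rfl
  rcases l with _|⟨c30, l⟩
  · simp [pyNums, pyNumsPos, pyColonsPos, pyCommasPos, pyPattern,
      PySem.List.pyGetD_ofNat', PySem.List.slice, List.all, List.zip]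
    simp only [Bool.and_assoc]
    ac_rfl
  · simp

-- ===== VERDICT (by name: the statement is the Claim_ definition above) =====
theorem IsSubTimeLine_spec : Claim_equal_IsSubTimeLine := by
  intro strP _
  exact IsSubTimeLine_eq_alt strP
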